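-- pv_equiv track=rewrite | github.com/luotong1995/leetcode | algorithm/slide_window_two_points/1297maxFreq/main.py | maxFreq2
-- ===== SOURCE A (Python) =====
-- from typing import Counter
--
-- def maxFreq2(s: str, maxLetters: int, minSize: int, maxSize: int) -> int:
--     n = len(s)
--     ans = 0
--     cnt = Counter()
--     for i in range(n - minSize + 1):
--         cur = s[i: i + minSize]
--         exist = set(cur)
--         if len(exist) <= maxLetters:
--             cnt[cur] += 1
--             ans = max(ans, cnt[cur])
--     return ans
-- ===== SOURCE B (Python) =====
-- def maxFreq2(s: str, maxLetters: int, minSize: int, maxSize: int) -> int: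
--     n = len(s)
--     wins = sorted(w for w in (s[i: i + minSize] for i in range(n - minSize + 1))
--                   if len(set(w)) <= maxLetters)
--     best = 0
--     run = 0
--     prev = None
--     for w in wins:
--         run = run + 1 if prev == w else 1
--         if run > best:
--             best = run
--         prev = w
--     return best
-- ===== Notes on version B (the rewrite author's own statement) =====
-- stated objective: alternative
-- what changed: A streams windows through a Counter hash map and keeps a running max; B has no counter at all: it collects the valid windows, sorts them, and finds the longest run of equal adjacent windows in one linear scan (equal windows are contiguous after sorting, so the longest run is the max multiplicity).
import Mathlib
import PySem

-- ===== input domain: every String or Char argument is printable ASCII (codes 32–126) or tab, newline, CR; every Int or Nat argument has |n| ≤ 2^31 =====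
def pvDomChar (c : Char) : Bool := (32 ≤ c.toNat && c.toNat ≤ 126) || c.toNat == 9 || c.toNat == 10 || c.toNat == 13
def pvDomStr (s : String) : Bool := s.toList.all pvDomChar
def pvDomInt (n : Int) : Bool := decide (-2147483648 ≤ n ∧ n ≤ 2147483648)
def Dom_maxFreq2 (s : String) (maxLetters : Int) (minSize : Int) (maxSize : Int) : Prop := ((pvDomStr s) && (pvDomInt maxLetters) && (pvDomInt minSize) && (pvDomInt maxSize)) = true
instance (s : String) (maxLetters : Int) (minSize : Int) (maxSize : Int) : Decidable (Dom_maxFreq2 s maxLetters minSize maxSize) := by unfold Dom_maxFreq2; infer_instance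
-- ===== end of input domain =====

-- B replaces A's Counter-with-running-max by a counter-free algorithm: collect the valid
-- windows, sort them, and take the longest run of equal adjacent windows (objective: alternative).

-- ===== PORT A =====
-- A: for each start i, slice the window, build its set, and if small enough bump its
-- counter and fold the running max.
def maxFreq2 (s : String) (maxLetters : Int) (minSize : Int) (maxSize : Int) : Int :=
  let n : Int := (s.toList.length : Int)
  let res := (PySem.List.pyRange 0 (n - minSize + 1) 1).foldl
    (fun (st : PySem.Dict (List Char) Int × Int) i =>
      let cur := PySem.List.slice s.toList (some i) (some (i + minSize))
      let exist := PySem.Set.ofList cur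
      if ((PySem.Set.len exist : Int) ≤ maxLetters) then
        let cnt := st.1.modify cur 0 (· + 1)
        (cnt, max st.2 (cnt.getD cur 0))
      else st)
    (PySem.Dict.empty, 0)
  res.2

-- ===== PORT B =====
-- B's loop body: state (best, run, prev); 'run = run + 1 if prev == w else 1', bump best, remember w.
def pvStep (st : Int × Int × Option (List Char)) (w : List Char) : Int × Int × Option (List Char) :=
  let run := if st.2.2 = some w then st.2.1 + 1 else 1
  let best := if run > st.1 then run else st.1
  (best, run, some w)

-- B: valid windows, sorted; then one scan for the longest run of equal adjacent windows.
def maxFreq2_alt (s : String) (maxLetters : Int) (minSize : Int) (maxSize : Int) : Int :=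
  let n : Int := (s.toList.length : Int)
  let wins := PySem.List.sorted
    (((PySem.List.pyRange 0 (n - minSize + 1) 1).map
        (fun i => PySem.List.slice s.toList (some i) (some (i + minSize)))).filter
      (fun w => decide ((PySem.Set.len (PySem.Set.ofList w) : Int) ≤ maxLetters)))
    (fun w => w) false
  (wins.foldl pvStep (0, 0, none)).1

-- ===== PRECONDITION & SPEC =====
def Spec_maxFreq2 (s : String) (maxLetters : Int) (minSize : Int) (maxSize : Int) (out : Int) : Prop := out = maxFreq2_alt s maxLetters minSize maxSize
instance (s : String) (maxLetters : Int) (minSize : Int) (maxSize : Int) (out : Int) : Decidable (Spec_maxFreq2 s maxLetters minSize maxSize out) := by unfold Spec_maxFreq2; infer_instance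

-- ===== CLAIM (what is proved, stated in full; the proofs are below) =====
def Claim_equal_maxFreq2 : Prop := ∀ (s : String) (maxLetters : Int) (minSize : Int) (maxSize : Int), Dom_maxFreq2 s maxLetters minSize maxSize → Spec_maxFreq2 s maxLetters minSize maxSize (maxFreq2 s maxLetters minSize maxSize)

-- ===== LEMMAS AND PROOFS =====

-- upper bound for a running max of a projection
theorem pv_foldl_max_le {α : Type} (f : α → Int) (m : Int) :
    ∀ (l : List α) (a : Int), a ≤ m → (∀ x ∈ l, f x ≤ m) →
      l.foldl (fun acc x => max acc (f x)) a ≤ m := by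
  intro l
  induction l with
  | nil => intro a ha _; simpa using ha
  | cons x t ih =>
      intro a ha hl
      simp only [List.foldl_cons]
      exact ih _ (max_le ha (hl x (by simp))) (fun y hy => hl y (by simp [hy]))

-- monotonicity of the running max in the seed and the projection
theorem pv_foldl_max_mono {α : Type} (f g : α → Int) :
    ∀ (l : List α) (a b : Int), a ≤ b → (∀ x ∈ l, f x ≤ g x) →
      l.foldl (fun acc x => max acc (f x)) a ≤ l.foldl (fun acc x => max acc (g x)) b := by
  intro l
  induction l with
  | nil => intro a b hab _; simpa using hab
  | cons x t ih =>
      intro a b hab h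
      simp only [List.foldl_cons]
      exact ih _ _ (max_le_max hab (h x (by simp))) (fun y hy => h y (by simp [hy]))

-- two running maxima over lists with the same members and the same projection agree
theorem pv_foldl_max_eq_of_mem_iff {α : Type} (f : α → Int) (l₁ l₂ : List α)
    (h : ∀ x, x ∈ l₁ ↔ x ∈ l₂) :
    l₁.foldl (fun acc x => max acc (f x)) 0 = l₂.foldl (fun acc x => max acc (f x)) 0 := by
  apply le_antisymm
  · exact pv_foldl_max_le f _ l₁ 0 (PySem.List.le_foldl_max_int l₂ f 0).1
      (fun x hx => (PySem.List.le_foldl_max_int l₂ f 0).2 x ((h x).mp hx))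
  · exact pv_foldl_max_le f _ l₂ 0 (PySem.List.le_foldl_max_int l₁ f 0).1
      (fun x hx => (PySem.List.le_foldl_max_int l₁ f 0).2 x ((h x).mpr hx))

-- the running max commutes with a max folded into the seed
theorem pv_foldl_max_seed {α : Type} (f : α → Int) :
    ∀ (l : List α) (a c : Int),
      l.foldl (fun acc x => max acc (f x)) (max a c)
        = max (l.foldl (fun acc x => max acc (f x)) a) c := by
  intro l
  induction l with
  | nil => intro a c; simp
  | cons x t ih =>
      intro a c
      simp only [List.foldl_cons]
      rw [max_right_comm, ih]

-- A's counting loop: the running max over post-increment counter values equals the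
-- running max of (final multiplicity) over the processed keys.
theorem pv_runA_eq (vs : List (List Char)) :
    ∀ (d : PySem.Dict (List Char) Int) (a : Int),
      (vs.foldl
        (fun (st : PySem.Dict (List Char) Int × Int) w =>
          (st.1.modify w 0 (· + 1), max st.2 ((st.1.modify w 0 (· + 1)).getD w 0)))
        (d, a)).2
      = vs.foldl (fun m w => max m (d.getD w 0 + (vs.count w : Int))) a := by
  induction vs with
  | nil => intro d a; rfl
  | cons w t ih =>
      intro d a
      simp only [List.foldl_cons]
      rw [PySem.Dict.getD_modify_self, ih]
      have hcongr :
          t.foldl (fun m u => max m ((d.modify w 0 (· + 1)).getD u 0 + (t.count u : Int)))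
            (max a (d.getD w 0 + 1))
          = t.foldl (fun m u => max m (d.getD u 0 + ((w :: t).count u : Int)))
            (max a (d.getD w 0 + 1)) := by
        apply PySem.List.foldl_congr_mem
        intro acc u hu
        by_cases hwu : u = w
        · subst hwu
          rw [PySem.Dict.getD_modify_self, List.count_cons_self]
          push_cast; ring_nf
        · rw [PySem.Dict.getD_modify_of_ne _ _ _ hwu]
          rw [List.count_cons]
          rw [if_neg (fun h => hwu (eq_of_beq h).symm)]
          norm_num
      rw [hcongr, pv_foldl_max_seed, pv_foldl_max_seed]
      have hgw : d.getD w 0 + 1 ≤ d.getD w 0 + ((w :: t).count w : Int) := by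
        rw [List.count_cons_self]; push_cast; omega
      by_cases hw : w ∈ t
      · have h1 : d.getD w 0 + ((w :: t).count w : Int)
            ≤ t.foldl (fun m u => max m (d.getD u 0 + ((w :: t).count u : Int))) a :=
          (PySem.List.le_foldl_max_int t
            (fun u => d.getD u 0 + ((w :: t).count u : Int)) a).2 w hw
        rw [max_eq_left (le_trans hgw h1), max_eq_left h1]
      · have hz : t.count w = 0 := List.count_eq_zero.mpr hw
        rw [List.count_cons_self, hz]
        norm_num

-- B's run scan over a sorted (nondecreasing) list: state after the whole list is
-- (max multiplicity, multiplicity of the last element, the last element).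
theorem pv_runscan_aux :
    ∀ (l : List (List Char)), l.Pairwise (· ≤ ·) → ∀ (h : l ≠ []),
      l.foldl pvStep (0, 0, none)
        = (l.foldl (fun m w => max m ((l.count w : Int))) 0,
           (l.count (l.getLast h) : Int), some (l.getLast h)) := by
  intro l
  induction l using List.reverseRecOn with
  | nil => intro _ h; exact absurd rfl h
  | append_singleton t x ih =>
      intro hs hne
      have hst : t.Pairwise (· ≤ ·) := hs.sublist (List.sublist_append_left t [x])
      have hgl : (t ++ [x]).getLast hne = x := by simp
      by_cases ht : t = []
      · subst ht
        simp [pvStep, List.foldl]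
      · have hle : ∀ y ∈ t, y ≤ x := by
          have := (List.pairwise_append.mp hs).2.2
          intro y hy; exact this y hy x (by simp)
        have hLmax : ∀ y ∈ t, y ≤ t.getLast ht :=
          fun y hy => hst.rel_getLast hy
        rw [List.foldl_append, ih hst ht, hgl]
        set L := t.getLast ht with hL
        set Mt := t.foldl (fun m w => max m ((t.count w : Int))) 0 with hMt
        have hMt0 : (0 : Int) ≤ Mt :=
          (PySem.List.le_foldl_max_int t (fun w => (t.count w : Int)) 0).1
        have hMtmem : ∀ w ∈ t, (t.count w : Int) ≤ Mt :=
          (PySem.List.le_foldl_max_int t (fun w => (t.count w : Int)) 0).2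
        have hMc : (t ++ [x]).foldl (fun m w => max m (((t ++ [x]).count w : Int))) 0
            = max (t.foldl (fun m w => max m (((t ++ [x]).count w : Int))) 0)
                (((t ++ [x]).count x : Int)) := by
          rw [List.foldl_append]; rfl
        by_cases hxL : L = x
        · -- x extends the run of the last element
          have hcx : (t ++ [x]).count x = t.count x + 1 := by
            simp [List.count_append]
          have hT : max (t.foldl (fun m w => max m (((t ++ [x]).count w : Int))) 0)
              (((t ++ [x]).count x : Int)) = max Mt (((t ++ [x]).count x : Int)) := by
            apply le_antisymm
            · apply max_le _ (le_max_right _ _)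
              apply (pv_foldl_max_le _ _ t 0 (hMt0.trans (le_max_left _ _)) _)
              intro w hw
              by_cases hwx : w = x
              · subst hwx
                exact le_max_right _ _
              · have hxw : ¬ x = w := fun h => hwx h.symm
                have : (t ++ [x]).count w = t.count w := by
                  simp [List.count_append, hxw]
                rw [this]
                exact (hMtmem w hw).trans (le_max_left _ _)
            · apply max_le _ (le_max_right _ _)
              refine (pv_foldl_max_mono _ _ t 0 0 le_rfl ?_).trans (le_max_left _ _)
              intro w hw
              have : t.count w ≤ (t ++ [x]).count w := by
                simp [List.count_append]
              exact_mod_cast this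
          rw [hxL, hMc, hT, hcx]
          simp only [List.foldl_cons, List.foldl_nil, pvStep, if_true]
          push_cast
          refine Prod.ext ?_ (Prod.ext ?_ rfl)
          · show (if (t.count x : Int) + 1 > Mt then (t.count x : Int) + 1 else Mt)
                = max Mt ((t.count x : Int) + 1)
            by_cases h' : (t.count x : Int) + 1 > Mt
            · rw [if_pos h', max_eq_right (le_of_lt h')]
            · rw [if_neg h', max_eq_left (le_of_not_gt h')]
          · rfl
        · -- x starts a fresh run: x does not occur in t
          have hxt : x ∉ t := fun hx =>
            hxL (le_antisymm (hle L (List.getLast_mem ht)) (hLmax x hx))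
          have hcx : (t ++ [x]).count x = 1 := by
            simp [List.count_append, List.count_eq_zero.mpr hxt]
          have hT : t.foldl (fun m w => max m (((t ++ [x]).count w : Int))) 0 = Mt := by
            apply PySem.List.foldl_congr_mem
            intro acc w hw
            have hxw : ¬ x = w := fun h => hxt (h ▸ hw)
            simp [List.count_append, hxw]
          rw [hMc, hT, hcx]
          simp only [List.foldl_cons, List.foldl_nil, pvStep]
          have hcond : ¬ ((some L : Option (List Char)) = some x) := by
            simpa using hxL
          rw [if_neg hcond]
          refine Prod.ext ?_ (Prod.ext (by norm_num) rfl)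
          show (if (1 : Int) > Mt then (1 : Int) else Mt) = max Mt (1 : Int)
          by_cases h' : (1 : Int) > Mt
          · rw [if_pos h', max_eq_right (le_of_lt h')]
          · rw [if_neg h', max_eq_left (le_of_not_gt h')]

-- the run scan on any sorted list returns the maximal multiplicity
theorem pv_runscan (l : List (List Char)) (hs : l.Pairwise (· ≤ ·)) :
    (l.foldl pvStep (0, 0, none)).1
      = l.foldl (fun m w => max m ((l.count w : Int))) 0 := by
  by_cases h : l = []
  · subst h; rfl
  · rw [pv_runscan_aux l hs h]

theorem pv_main (s : String) (maxLetters minSize maxSize : Int) :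
    maxFreq2 s maxLetters minSize maxSize = maxFreq2_alt s maxLetters minSize maxSize := by
  unfold maxFreq2 maxFreq2_alt
  simp only []
  set ws := (PySem.List.pyRange 0 ((s.toList.length : Int) - minSize + 1) 1).map
    (fun i => PySem.List.slice s.toList (some i) (some (i + minSize))) with hws
  set P : List Char → Prop :=
    fun w => ((PySem.Set.len (PySem.Set.ofList w) : Int) ≤ maxLetters) with hP
  -- A's fold over the range is a fold over the window list ws
  rw [show (PySem.List.pyRange 0 ((s.toList.length : Int) - minSize + 1) 1).foldl
      (fun (st : PySem.Dict (List Char) Int × Int) i =>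
        let cur := PySem.List.slice s.toList (some i) (some (i + minSize))
        let exist := PySem.Set.ofList cur
        if ((PySem.Set.len exist : Int) ≤ maxLetters) then
          let cnt := st.1.modify cur 0 (· + 1)
          (cnt, max st.2 (cnt.getD cur 0))
        else st)
      (PySem.Dict.empty, 0)
    = ws.foldl
      (fun (st : PySem.Dict (List Char) Int × Int) w =>
        if P w then
          (st.1.modify w 0 (· + 1), max st.2 ((st.1.modify w 0 (· + 1)).getD w 0))
        else st)
      (PySem.Dict.empty, 0) from by
      rw [hws, List.foldl_map]]
  -- A side: drop invalid windows, then the running-max characterisation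
  rw [PySem.List.foldl_ite_eq_foldl_filter]
  rw [pv_runA_eq]
  set vs := ws.filter (fun w => decide (P w)) with hvs
  have hA : vs.foldl
      (fun m w => max m ((PySem.Dict.empty : PySem.Dict (List Char) Int).getD w 0 + (vs.count w : Int))) 0
      = vs.foldl (fun m w => max m ((vs.count w : Int))) 0 := by
    apply PySem.List.foldl_congr_mem
    intro acc w _
    rw [PySem.Dict.getD_empty]; ring_nf
  rw [hA]
  -- B side: sorted(vs) is nondecreasing, so the run scan yields its max multiplicity
  set sv := PySem.List.sorted vs (fun w => w) false with hsv
  have hdec : (fun (a b : List Char) => a.decidableLT b)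
      = (fun a b => (LinearOrder.toDecidableLT : DecidableLT (List Char)) a b) := by
    funext a b; exact Subsingleton.elim _ _
  have hsorted : sv.Pairwise (· ≤ ·) := by
    rw [hsv]
    show (@PySem.List.sorted (List Char) (List Char) _ (fun a b => a.decidableLT b)
        vs (fun w => w) false).Pairwise (· ≤ ·)
    rw [hdec]
    exact PySem.List.sorted_pairwise vs (fun w => w)
  rw [pv_runscan sv hsorted]
  -- sorted(vs) is a permutation of vs: same counts, same members
  have hperm : sv.Perm vs := PySem.List.sorted_perm vs (fun w => w) false
  have hcnt : sv.foldl (fun m w => max m ((sv.count w : Int))) 0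
      = sv.foldl (fun m w => max m ((vs.count w : Int))) 0 := by
    apply PySem.List.foldl_congr_mem
    intro acc w _
    rw [hperm.count_eq]
  rw [hcnt]
  exact (pv_foldl_max_eq_of_mem_iff (fun w => (vs.count w : Int)) vs sv
    (fun w => (hperm.mem_iff).symm)).symm ▸ rfl

-- ===== VERDICT (by name: the statement is the Claim_ definition above) =====
theorem maxFreq2_spec : Claim_equal_maxFreq2 := by
  intro s maxLetters minSize maxSize _
  unfold Spec_maxFreq2
  exact pv_main s maxLetters minSize maxSize
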